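-- pv_equiv track=rewrite | github.com/dongjun-Yi/Algorithm | 프로그래머스/2/81302. 거리두기 확인하기/거리두기 확인하기.py | bfs
-- ===== SOURCE A (Python) =====
-- from collections import deque
--
-- dx = [0,0,1,-1]
--
-- dy = [-1,1,0,0]
--
-- def bfs(x,y, p):
--     start = []
--
--     # 응시자가 앉은 위치 찾기
--     for i in range(5):
--         for j in range(5):
--             if p[i][j] == 'P':
--                 start.append([i,j])
--
--     for s in start:
--         q = deque([s])
--         # 방문 처리 기록
--         visited = [[False] * 5 for _ in range(5)]
--         visited[s[0]][s[1]] = True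
--
--         # 응시자간 거리 기록
--         distance = [[0] * 5 for _ in range(5)]
--
--         while q:
--             x,y = q.popleft()
--
--             for i in range(4):
--                 nx = x + dx[i]
--                 ny = y + dy[i]
--
--                 if nx <0 or nx>=5 or ny< 0 or ny>=5 or visited[nx][ny]:
--                     continue
--
--                 # 빈자리일 경우 응시간의 거리를 측정하기 위해 거리를 기록
--                 if p[nx][ny] == 'O':
--                     q.append((nx,ny))
--                     visited[nx][ny] = True
--                     distance[nx][ny] = distance[x][y] + 1
--
--                 # 응시자인 경우 거리가 2 미만일 경우 거리두기 실패
--                 if p[nx][ny] == 'P' and distance[x][y] <2: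
--                     return 0
--     return 1
-- ===== SOURCE B (Python) =====
-- ORTH = ((0, 1), (0, -1), (1, 0), (-1, 0))
-- DIAG = ((1, 1), (1, -1), (-1, 1), (-1, -1))
--
-- def _danger(g, i, j):
--     # a 'P' at distance 1, or at distance 2 reachable through one free ('O') seat
--     if any(0 <= i + a < 5 and 0 <= j + b < 5 and g[i + a][j + b] == 'P'
--            for a, b in ORTH):
--         return True
--     if any(0 <= i + 2 * a < 5 and 0 <= j + 2 * b < 5 and g[i + 2 * a][j + 2 * b] == 'P'
--            and g[i + a][j + b] == 'O'
--            for a, b in ORTH):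
--         return True
--     if any(0 <= i + a < 5 and 0 <= j + b < 5 and g[i + a][j + b] == 'P'
--            and (g[i + a][j] == 'O' or g[i][j + b] == 'O')
--            for a, b in DIAG):
--         return True
--     return False
--
-- def bfs(x, y, p):
--     g = [[p[i][j] for j in range(5)] for i in range(5)]
--     if any(g[i][j] == 'P' and _danger(g, i, j)
--            for i in range(5) for j in range(5)):
--         return 0
--     return 1
-- ===== Notes on version B (the rewrite author's own statement) =====
-- stated objective: simpler
-- what changed: Replaces the per-'P' BFS with queue/visited/distance matrices by a direct fixed-offset neighbourhood check: a 'P' within distance 1, straight distance 2 through an 'O', or diagonal distance 2 through either linking 'O' corner, fails the rule; Pre_ only excludes grids smaller than 5x5, on which A raises IndexError.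
import Mathlib
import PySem

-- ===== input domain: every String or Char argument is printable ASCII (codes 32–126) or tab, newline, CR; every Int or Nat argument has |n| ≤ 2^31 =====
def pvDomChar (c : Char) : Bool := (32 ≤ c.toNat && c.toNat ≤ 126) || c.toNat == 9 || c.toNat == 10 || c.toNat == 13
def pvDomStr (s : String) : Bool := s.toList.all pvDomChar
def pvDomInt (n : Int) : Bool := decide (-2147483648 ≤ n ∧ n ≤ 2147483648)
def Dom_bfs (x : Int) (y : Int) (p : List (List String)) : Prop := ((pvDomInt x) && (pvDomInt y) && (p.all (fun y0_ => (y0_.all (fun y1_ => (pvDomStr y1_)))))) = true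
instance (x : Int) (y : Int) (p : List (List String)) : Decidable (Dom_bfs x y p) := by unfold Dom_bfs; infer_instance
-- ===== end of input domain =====

-- B replaces A's per-'P' BFS by a direct fixed-offset neighbourhood check (simpler, no queue/visited/distance state).

-- ===== PORT A =====
-- p[i][j]; exact whenever 0 ≤ i, j < 5 under Pre_bfs (the only accesses either program makes).
def cell (p : List (List String)) (i j : Int) : String :=
  (PySem.List.pyGet? ((PySem.List.pyGet? p i).getD []) j).getD ""

def dxA : List Int := [0, 0, 1, -1]
def dyA : List Int := [-1, 1, 0, 0]
-- the four (dx[i], dy[i]) direction pairs of A's `for i in range(4)` loop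
def dirsA : List (Int × Int) := dxA.zip dyA

-- the body of A's `for i in range(4)` loop: one popped cell (x, y); the 5×5 visited and
-- distance matrices are modelled as functions; `none` = the Python `return 0` fired.
-- In the `return 0` test, `dist x y` is the matrix entry at check time: the preceding
-- 'O'-branch only writes at (nx, ny), which is unvisited while (x, y) is visited.
def innerA (p : List (List String)) (x y : Int) :
    List (Int × Int) → List (Int × Int) → (Int → Int → Bool) → (Int → Int → Int) →
    Option (List (Int × Int) × (Int → Int → Bool) × (Int → Int → Int))
  | [], q, vis, dist => some (q, vis, dist)
  | (dxi, dyi) :: rest, q, vis, dist =>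
    let nx := x + dxi
    let ny := y + dyi
    if nx < 0 ∨ 5 ≤ nx ∨ ny < 0 ∨ 5 ≤ ny ∨ vis nx ny = true then
      innerA p x y rest q vis dist
    else
      let q1 := if cell p nx ny = "O" then q ++ [(nx, ny)] else q
      let vis1 := if cell p nx ny = "O" then (fun a b => if a = nx ∧ b = ny then true else vis a b) else vis
      let dist1 := if cell p nx ny = "O" then (fun a b => if a = nx ∧ b = ny then dist x y + 1 else dist a b) else dist
      if cell p nx ny = "P" ∧ dist x y < 2 then none
      else innerA p x y rest q1 vis1 dist1

-- A's `while q` loop; fuel 30 is never exhausted: each pop consumes one queue entry and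
-- every entry is enqueued at most once among the 25 cells (≤ 25 pops in total).
def loopA (p : List (List String)) :
    Nat → List (Int × Int) → (Int → Int → Bool) → (Int → Int → Int) → Int
  | 0, _, _, _ => 1
  | _ + 1, [], _, _ => 1
  | fuel + 1, c :: rest, vis, dist =>
    match innerA p c.1 c.2 dirsA rest vis dist with
    | none => 0
    | some (q', vis', dist') => loopA p fuel q' vis' dist'

-- one iteration of A's `for s in start` loop: BFS from s = (sx, sy)
def bfsOneA (p : List (List String)) (sx sy : Int) : Int :=
  loopA p 30 [(sx, sy)]
    (fun a b => if a = sx ∧ b = sy then true else false)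
    (fun _ _ => 0)

def r5 : List Int := PySem.List.pyRange 0 5 1

-- the `start` list: scan of the 5×5 grid for 'P' cells
def startA (p : List (List String)) : List (Int × Int) :=
  r5.foldl (fun acc i =>
    r5.foldl (fun acc2 j => if cell p i j = "P" then acc2 ++ [(i, j)] else acc2) acc) []

def outerA (p : List (List String)) : List (Int × Int) → Int
  | [] => 1
  | s :: rest => if bfsOneA p s.1 s.2 = 0 then 0 else outerA p rest

def bfs (x : Int) (y : Int) (p : List (List String)) : Int :=
  outerA p (startA p)

-- ===== PORT B =====
def orthB : List (Int × Int) := [(0, 1), (0, -1), (1, 0), (-1, 0)]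
def diagB : List (Int × Int) := [(1, 1), (1, -1), (-1, 1), (-1, -1)]

def dangerB (p : List (List String)) (i j : Int) : Bool :=
  (orthB.any fun d =>
    (decide (0 ≤ i + d.1) && decide (i + d.1 < 5) && decide (0 ≤ j + d.2) && decide (j + d.2 < 5)) &&
    (cell p (i + d.1) (j + d.2) == "P")) ||
  (orthB.any fun d =>
    (decide (0 ≤ i + 2 * d.1) && decide (i + 2 * d.1 < 5) && decide (0 ≤ j + 2 * d.2) && decide (j + 2 * d.2 < 5)) &&
    (cell p (i + 2 * d.1) (j + 2 * d.2) == "P") && (cell p (i + d.1) (j + d.2) == "O")) ||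
  (diagB.any fun d =>
    (decide (0 ≤ i + d.1) && decide (i + d.1 < 5) && decide (0 ≤ j + d.2) && decide (j + d.2 < 5)) &&
    (cell p (i + d.1) (j + d.2) == "P") &&
    ((cell p (i + d.1) j == "O") || (cell p i (j + d.2) == "O")))

-- g = [[p[i][j] for j in range(5)] for i in range(5)]: the 5x5 board snapshot B takes first
def gridB (p : List (List String)) : List (List String) :=
  r5.map fun i => r5.map fun j => cell p i j

def bfs_alt (x : Int) (y : Int) (p : List (List String)) : Int :=
  let g := gridB p
  if r5.any (fun i => r5.any fun j => (cell g i j == "P") && dangerB g i j) then 0 else 1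

-- ===== PRECONDITION & SPEC =====
-- Pre_ excludes exactly the grids smaller than 5×5, on which the Python A raises IndexError.
def Pre_bfs (x : Int) (y : Int) (p : List (List String)) : Prop :=
  5 ≤ p.length ∧ ∀ row ∈ p.take 5, 5 ≤ row.length
instance (x : Int) (y : Int) (p : List (List String)) : Decidable (Pre_bfs x y p) := by
  unfold Pre_bfs; infer_instance

def pvWitness_bfs : Int × Int × List (List String) :=
  (0, 0, [["P", "O", "O", "O", "P"],
          ["O", "X", "X", "X", "O"],
          ["O", "X", "P", "X", "O"],
          ["O", "X", "X", "X", "O"],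
          ["P", "O", "O", "O", "P"]])

def Spec_bfs (x : Int) (y : Int) (p : List (List String)) (out : Int) : Prop := out = bfs_alt x y p
instance (x : Int) (y : Int) (p : List (List String)) (out : Int) : Decidable (Spec_bfs x y p out) := by unfold Spec_bfs; infer_instance

-- ===== CLAIM (what is proved, stated in full; the proofs are below) =====
def Claim_equal_bfs : Prop := ∀ (x : Int) (y : Int) (p : List (List String)), Dom_bfs x y p → Pre_bfs x y p → Spec_bfs x y p (bfs x y p)

-- ===== LEMMAS AND PROOFS =====

-- in-range on the 5×5 board
def IRc (m : Int × Int) : Prop := 0 ≤ m.1 ∧ m.1 < 5 ∧ 0 ≤ m.2 ∧ m.2 < 5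

-- "popping n triggers `return 0`" for a BFS started at the 'P' cell s, state-free form
def Trig (p : List (List String)) (s n : Int × Int) : Prop :=
  ∃ d ∈ dirsA, IRc (n.1 + d.1, n.2 + d.2) ∧ cell p (n.1 + d.1) (n.2 + d.2) = "P" ∧
    (n.1 + d.1, n.2 + d.2) ≠ s

-- A's BFS from s returns 0 iff: a 'P' orthogonally adjacent to s, or an in-range 'O'
-- neighbour of s from which a further step reaches a 'P' other than s.
def VA (p : List (List String)) (s : Int × Int) : Prop :=
  (∃ d ∈ dirsA, IRc (s.1 + d.1, s.2 + d.2) ∧ cell p (s.1 + d.1) (s.2 + d.2) = "P") ∨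
  (∃ d ∈ dirsA, IRc (s.1 + d.1, s.2 + d.2) ∧ cell p (s.1 + d.1) (s.2 + d.2) = "O" ∧
     Trig p s (s.1 + d.1, s.2 + d.2))

lemma dirsA_eq : dirsA = [(0, -1), (0, 1), (1, 0), (-1, 0)] := by decide

lemma r5_eq : r5 = [0, 1, 2, 3, 4] := by decide

lemma mem_r5_bounds {i : Int} (h : i ∈ r5) : 0 ≤ i ∧ i < 5 := by
  rw [r5_eq] at h
  simp only [List.mem_cons, List.not_mem_nil, or_false] at h
  rcases h with h | h | h | h | h <;> omega

lemma innerA_none_iff (p : List (List String)) (x y : Int) (dirs : List (Int × Int)) :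
    ∀ (q : List (Int × Int)) (vis : Int → Int → Bool) (dist : Int → Int → Int),
    vis x y = true →
    (innerA p x y dirs q vis dist = none ↔
      (dist x y < 2 ∧ ∃ d ∈ dirs, IRc (x + d.1, y + d.2) ∧
        vis (x + d.1) (y + d.2) = false ∧ cell p (x + d.1) (y + d.2) = "P")) := by
  induction dirs with
  | nil => intro q vis dist hx; simp [innerA]
  | cons d rest ih =>
    obtain ⟨dxi, dyi⟩ := d
    intro q vis dist hx
    simp only [innerA]
    by_cases hg : x + dxi < 0 ∨ 5 ≤ x + dxi ∨ y + dyi < 0 ∨ 5 ≤ y + dyi ∨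
        vis (x + dxi) (y + dyi) = true
    · rw [if_pos hg, ih q vis dist hx]
      constructor
      · rintro ⟨h2, d', hd', hrest⟩
        exact ⟨h2, d', List.mem_cons_of_mem _ hd', hrest⟩
      · rintro ⟨h2, d', hd', hIR, hv, hP⟩
        rcases List.mem_cons.1 hd' with rfl | hd'
        · exfalso
          simp only at hIR hv
          rcases hg with h | h | h | h | h
          · exact absurd hIR.1 (by omega)
          · exact absurd hIR.2.1 (by omega)
          · exact absurd hIR.2.2.1 (by omega)
          · exact absurd hIR.2.2.2 (by omega)
          · rw [hv] at h; exact Bool.noConfusion h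
        · exact ⟨h2, d', hd', hIR, hv, hP⟩
    · rw [if_neg hg]
      push_neg at hg
      obtain ⟨hb1, hb2, hb3, hb4, hbv⟩ := hg
      have hvfalse : vis (x + dxi) (y + dyi) = false := by
        cases h : vis (x + dxi) (y + dyi)
        · rfl
        · exact absurd h hbv
      have hOP : ("O" : String) ≠ "P" := by decide
      by_cases hP : cell p (x + dxi) (y + dyi) = "P"
      · have hO : ¬ cell p (x + dxi) (y + dyi) = "O" := by rw [hP]; exact fun h => hOP h.symm
        simp only [if_neg hO]
        by_cases h2 : dist x y < 2
        · rw [if_pos ⟨hP, h2⟩]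
          simp only [true_iff]
          exact ⟨h2, (dxi, dyi), List.mem_cons_self,
            ⟨by omega, by omega, by omega, by omega⟩, hvfalse, hP⟩
        · rw [if_neg (fun h => h2 h.2), ih q vis dist hx]
          constructor
          · rintro ⟨hh, _⟩; exact absurd hh h2
          · rintro ⟨hh, _⟩; exact absurd hh h2
      · rw [if_neg (fun h => hP h.1)]
        by_cases hO : cell p (x + dxi) (y + dyi) = "O"
        · simp only [if_pos hO]
          have hne : ¬(x = x + dxi ∧ y = y + dyi) := by
            rintro ⟨h1, h2⟩
            rw [← h1, ← h2, hx] at hvfalse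
            exact Bool.noConfusion hvfalse
          have hx1 : (fun a b => if a = x + dxi ∧ b = y + dyi then true else vis a b) x y
              = true := by simp only [if_neg hne, hx]
          rw [ih _ _ _ hx1]
          rw [if_neg hne]
          constructor
          · rintro ⟨h2, d', hd', hIR, hv1, hP'⟩
            refine ⟨h2, d', List.mem_cons_of_mem _ hd', hIR, ?_, hP'⟩
            by_cases hc : x + d'.1 = x + dxi ∧ y + d'.2 = y + dyi
            · rw [if_pos hc] at hv1; exact Bool.noConfusion hv1
            · rw [if_neg hc] at hv1; exact hv1
          · rintro ⟨h2, d', hd', hIR, hv, hP'⟩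
            rcases List.mem_cons.1 hd' with rfl | hd'
            · exact absurd hP' (by simp only at hP' ⊢; rw [hO]; exact fun h => hOP h)
            · refine ⟨h2, d', hd', hIR, ?_, hP'⟩
              have hc : ¬(x + d'.1 = x + dxi ∧ y + d'.2 = y + dyi) := by
                rintro ⟨e1, e2⟩
                rw [e1, e2] at hP'
                exact hOP (hO ▸ hP')
              simp only [if_neg hc]
              exact hv
        · simp only [if_neg hO]
          rw [ih q vis dist hx]
          constructor
          · rintro ⟨h2, d', hd', hrest⟩
            exact ⟨h2, d', List.mem_cons_of_mem _ hd', hrest⟩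
          · rintro ⟨h2, d', hd', hIR, hv, hP'⟩
            rcases List.mem_cons.1 hd' with rfl | hd'
            · exact absurd hP' hP
            · exact ⟨h2, d', hd', hIR, hv, hP'⟩

lemma innerA_some_spec (p : List (List String)) (x y : Int) (dirs : List (Int × Int)) :
    ∀ (q : List (Int × Int)) (vis : Int → Int → Bool) (dist : Int → Int → Int)
      (q' : List (Int × Int)) (vis' : Int → Int → Bool) (dist' : Int → Int → Int),
    vis x y = true →
    innerA p x y dirs q vis dist = some (q', vis', dist') →
    ∃ new : List (Int × Int),
      q' = q ++ new ∧
      new.length ≤ dirs.length ∧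
      (∀ a b, vis' a b = true ↔ (vis a b = true ∨ (a, b) ∈ new)) ∧
      (∀ a b, vis a b = true → dist' a b = dist a b) ∧
      (∀ m ∈ new, IRc m ∧ cell p m.1 m.2 = "O" ∧ dist' m.1 m.2 = dist x y + 1) ∧
      (∀ m ∈ new, ∃ d ∈ dirs, m = (x + d.1, y + d.2)) ∧
      (∀ d ∈ dirs, IRc (x + d.1, y + d.2) → cell p (x + d.1) (y + d.2) = "O" →
        vis (x + d.1) (y + d.2) = false → (x + d.1, y + d.2) ∈ new) := by
  induction dirs with
  | nil =>
    intro q vis dist q' vis' dist' hx hsome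
    simp only [innerA, Option.some.injEq, Prod.mk.injEq] at hsome
    obtain ⟨hq, hv, hd⟩ := hsome
    subst hq; subst hv; subst hd
    refine ⟨[], by simp, by simp, by simp, by simp, by simp, by simp, ?_⟩
    intro d hd; exact absurd hd (List.not_mem_nil)
  | cons d rest ih =>
    obtain ⟨dxi, dyi⟩ := d
    intro q vis dist q' vis' dist' hx hsome
    simp only [innerA] at hsome
    by_cases hg : x + dxi < 0 ∨ 5 ≤ x + dxi ∨ y + dyi < 0 ∨ 5 ≤ y + dyi ∨
        vis (x + dxi) (y + dyi) = true
    · rw [if_pos hg] at hsome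
      obtain ⟨new, h1, h2, h3, h4, h5, h6, h7⟩ := ih q vis dist q' vis' dist' hx hsome
      refine ⟨new, h1, le_trans h2 (by simp), h3, h4, h5, ?_, ?_⟩
      · intro m hm; obtain ⟨d', hd', he⟩ := h6 m hm
        exact ⟨d', List.mem_cons_of_mem _ hd', he⟩
      · intro d' hd' hIR hOd hv
        rcases List.mem_cons.1 hd' with rfl | hd'
        · exfalso
          simp only [IRc] at hIR
          rcases hg with h | h | h | h | h
          · exact absurd hIR.1 (by omega)
          · exact absurd hIR.2.1 (by omega)
          · exact absurd hIR.2.2.1 (by omega)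
          · exact absurd hIR.2.2.2 (by omega)
          · rw [hv] at h; exact Bool.noConfusion h
        · exact h7 d' hd' hIR hOd hv
    · rw [if_neg hg] at hsome
      push_neg at hg
      obtain ⟨hb1, hb2, hb3, hb4, hbv⟩ := hg
      have hvfalse : vis (x + dxi) (y + dyi) = false := by
        cases h : vis (x + dxi) (y + dyi)
        · rfl
        · exact absurd h hbv
      have hOP : ("O" : String) ≠ "P" := by decide
      by_cases hO : cell p (x + dxi) (y + dyi) = "O"
      · have hPn : ¬(cell p (x + dxi) (y + dyi) = "P" ∧ dist x y < 2) := by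
          rintro ⟨h, -⟩; exact hOP (hO.symm.trans h)
        rw [if_pos hO, if_pos hO, if_pos hO, if_neg hPn] at hsome
        have hne : ¬(x = x + dxi ∧ y = y + dyi) := by
          rintro ⟨h1, h2⟩
          rw [← h1, ← h2, hx] at hvfalse
          exact Bool.noConfusion hvfalse
        have hx1 : (fun a b => if a = x + dxi ∧ b = y + dyi then true else vis a b) x y
            = true := by simp only [if_neg hne]; exact hx
        obtain ⟨new', h1, h2, h3, h4, h5, h6, h7⟩ := ih _ _ _ _ _ _ hx1 hsome
        refine ⟨(x + dxi, y + dyi) :: new', ?_, ?_, ?_, ?_, ?_, ?_, ?_⟩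
        · rw [h1, List.append_assoc]; rfl
        · simp only [List.length_cons]; exact Nat.succ_le_succ h2
        · intro a b
          rw [h3 a b]
          by_cases hc : a = x + dxi ∧ b = y + dyi
          · simp [hc, hc.1, hc.2, List.mem_cons]
          · have hne3 : (a, b) ≠ (x + dxi, y + dyi) := fun he =>
              hc ⟨congrArg Prod.fst he, congrArg Prod.snd he⟩
            simp [hc, List.mem_cons, hne3]
        · intro a b hv
          have hne2 : ¬(a = x + dxi ∧ b = y + dyi) := by
            rintro ⟨rfl, rfl⟩
            rw [hv] at hvfalse; exact Bool.noConfusion hvfalse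
          have hv1 : (fun a b => if a = x + dxi ∧ b = y + dyi then true else vis a b) a b
              = true := by simp only [if_neg hne2]; exact hv
          rw [h4 a b hv1]
          simp only [if_neg hne2]
        · intro m hm
          rcases List.mem_cons.1 hm with rfl | hm
          · refine ⟨by simp only [IRc]; exact ⟨hb1, hb2, hb3, hb4⟩, hO, ?_⟩
            have hv1 : (fun a b => if a = x + dxi ∧ b = y + dyi then true else vis a b)
                (x + dxi) (y + dyi) = true := by simp
            rw [h4 _ _ hv1]
            simp
          · obtain ⟨hIR, hOm, hdm⟩ := h5 m hm
            refine ⟨hIR, hOm, ?_⟩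
            rw [hdm]
            simp only [if_neg hne]
        · intro m hm
          rcases List.mem_cons.1 hm with rfl | hm
          · exact ⟨(dxi, dyi), List.mem_cons_self, rfl⟩
          · obtain ⟨d', hd', he⟩ := h6 m hm
            exact ⟨d', List.mem_cons_of_mem _ hd', he⟩
        · intro d' hd' hIR hOd hv
          rcases List.mem_cons.1 hd' with rfl | hd'
          · exact List.mem_cons_self
          · by_cases hc : (x + d'.1, y + d'.2) = (x + dxi, y + dyi)
            · rw [hc]; exact List.mem_cons_self
            · refine List.mem_cons_of_mem _ (h7 d' hd' hIR hOd ?_)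
              have hcc : ¬(x + d'.1 = x + dxi ∧ y + d'.2 = y + dyi) := fun hcc =>
                hc (by rw [hcc.1, hcc.2])
              simp only [if_neg hcc]
              exact hv
      · rw [if_neg hO, if_neg hO, if_neg hO] at hsome
        by_cases hP2 : cell p (x + dxi) (y + dyi) = "P" ∧ dist x y < 2
        · rw [if_pos hP2] at hsome; simp at hsome
        · rw [if_neg hP2] at hsome
          obtain ⟨new, h1, h2, h3, h4, h5, h6, h7⟩ := ih q vis dist q' vis' dist' hx hsome
          refine ⟨new, h1, le_trans h2 (by simp), h3, h4, h5, ?_, ?_⟩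
          · intro m hm; obtain ⟨d', hd', he⟩ := h6 m hm
            exact ⟨d', List.mem_cons_of_mem _ hd', he⟩
          · intro d' hd' hIR hOd hv
            rcases List.mem_cons.1 hd' with rfl | hd'
            · exact absurd hOd hO
            · exact h7 d' hd' hIR hOd hv

-- phase 3: once every queued cell is visited with recorded distance ≥ 2, no trigger fires
lemma loopA_ge2 (p : List (List String)) :
    ∀ (fuel : Nat) (q : List (Int × Int)) (vis : Int → Int → Bool) (dist : Int → Int → Int),
    (∀ c ∈ q, vis c.1 c.2 = true ∧ 2 ≤ dist c.1 c.2) →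
    loopA p fuel q vis dist = 1 := by
  intro fuel
  induction fuel with
  | zero => intro q vis dist _; rfl
  | succ f ih =>
    rintro (_ | ⟨c, rest⟩) vis dist h
    · rfl
    · obtain ⟨hvc, hdc⟩ := h c List.mem_cons_self
      simp only [loopA]
      rcases hs : innerA p c.1 c.2 dirsA rest vis dist with _ | ⟨⟨q', vis', dist'⟩⟩
      · exfalso
        rw [innerA_none_iff p c.1 c.2 dirsA rest vis dist hvc] at hs
        exact absurd hs.1 (by omega)
      · obtain ⟨new, h1, h2, h3, h4, h5, h6, h7⟩ :=
          innerA_some_spec p c.1 c.2 dirsA rest vis dist q' vis' dist' hvc hs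
        apply ih
        intro c' hc'
        obtain ⟨c1, c2⟩ := c'
        rw [h1] at hc'
        rcases List.mem_append.1 hc' with hc' | hc'
        · obtain ⟨hm1, hm2⟩ := h (c1, c2) (List.mem_cons_of_mem _ hc')
          exact ⟨(h3 c1 c2).2 (Or.inl hm1), by rw [h4 c1 c2 hm1]; exact hm2⟩
        · obtain ⟨hIR, hOm, hdm⟩ := h5 (c1, c2) hc'
          exact ⟨(h3 c1 c2).2 (Or.inr hc'), by rw [hdm]; omega⟩

-- phase 2: popping the distance-1 cells
lemma loopA_phase2 (p : List (List String)) (s : Int × Int) :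
    ∀ (q1 : List (Int × Int)) (fuel : Nat) (q2 : List (Int × Int))
      (vis : Int → Int → Bool) (dist : Int → Int → Int),
    q1.length < fuel →
    (∀ n ∈ q1, vis n.1 n.2 = true ∧ dist n.1 n.2 = 1) →
    (∀ a b, vis a b = true → cell p a b = "P" → (a, b) = s) →
    vis s.1 s.2 = true →
    (∀ c ∈ q2, vis c.1 c.2 = true ∧ 2 ≤ dist c.1 c.2) →
    (loopA p fuel (q1 ++ q2) vis dist = 0 ↔ ∃ n ∈ q1, Trig p s n) := by
  intro q1
  induction q1 with
  | nil =>
    intro fuel q2 vis dist _ _ _ _ hq2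
    rw [List.nil_append, loopA_ge2 p fuel q2 vis dist hq2]
    constructor
    · intro h; exact absurd h (by norm_num)
    · rintro ⟨n, hn, -⟩; exact absurd hn (List.not_mem_nil)
  | cons n rest ih =>
    intro fuel q2 vis dist hf hq1 hInv hvs hq2
    obtain ⟨n1, n2⟩ := n
    cases fuel with
    | zero => exact absurd hf (by simp)
    | succ f =>
      obtain ⟨hvn0, hdn0⟩ := hq1 (n1, n2) List.mem_cons_self
      have hvn : vis n1 n2 = true := hvn0
      have hdn : dist n1 n2 = 1 := hdn0
      simp only [List.cons_append, loopA]
      rcases hs : innerA p n1 n2 dirsA (rest ++ q2) vis dist with _ | ⟨⟨q', vis', dist'⟩⟩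
      · rw [innerA_none_iff p n1 n2 dirsA _ vis dist hvn] at hs
        obtain ⟨-, d, hd, hIR, hv, hP⟩ := hs
        have hne : ((n1, n2).1 + d.1, (n1, n2).2 + d.2) ≠ s := by
          intro he
          have e1 : (n1, n2).1 + d.1 = s.1 := congrArg Prod.fst he
          have e2 : (n1, n2).2 + d.2 = s.2 := congrArg Prod.snd he
          rw [e1, e2, hvs] at hv
          exact Bool.noConfusion hv
        constructor
        · intro _
          exact ⟨(n1, n2), List.mem_cons_self, d, hd, hIR, hP, hne⟩
        · intro _; rfl
      · have hnt : ¬ Trig p s (n1, n2) := by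
          intro ht
          obtain ⟨d, hd, hIR, hP, hne⟩ := ht
          have hn0 : innerA p n1 n2 dirsA (rest ++ q2) vis dist = none := by
            rw [innerA_none_iff p n1 n2 dirsA _ vis dist hvn]
            refine ⟨by omega, d, hd, hIR, ?_, hP⟩
            cases hvv : vis ((n1, n2).1 + d.1) ((n1, n2).2 + d.2)
            · rfl
            · exact absurd (hInv _ _ hvv hP) hne
          rw [hn0] at hs
          simp at hs
        obtain ⟨new, h1, h2, h3, h4, h5, h6, h7⟩ :=
          innerA_some_spec p n1 n2 dirsA (rest ++ q2) vis dist q' vis' dist' hvn hs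
        have hfu : rest.length < f := by
          simp only [List.length_cons] at hf; omega
        have hq1' : ∀ m ∈ rest, vis' m.1 m.2 = true ∧ dist' m.1 m.2 = 1 := by
          intro m hm
          obtain ⟨hm1, hm2⟩ := hq1 m (List.mem_cons_of_mem _ hm)
          exact ⟨(h3 m.1 m.2).2 (Or.inl hm1), by rw [h4 m.1 m.2 hm1]; exact hm2⟩
        have hInv' : ∀ a b, vis' a b = true → cell p a b = "P" → (a, b) = s := by
          intro a b hv' hPc
          rcases (h3 a b).1 hv' with hvv | hnn
          · exact hInv a b hvv hPc
          · obtain ⟨-, hOc, -⟩ := h5 (a, b) hnn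
            exact absurd (hOc.symm.trans hPc) (by decide)
        have hvs' : vis' s.1 s.2 = true := (h3 s.1 s.2).2 (Or.inl hvs)
        have hq2' : ∀ c ∈ q2 ++ new, vis' c.1 c.2 = true ∧ 2 ≤ dist' c.1 c.2 := by
          intro c hc
          obtain ⟨c1, c2⟩ := c
          rcases List.mem_append.1 hc with hc | hc
          · obtain ⟨hm1, hm2⟩ := hq2 (c1, c2) hc
            exact ⟨(h3 c1 c2).2 (Or.inl hm1), by rw [h4 c1 c2 hm1]; exact hm2⟩
          · obtain ⟨-, -, hdm⟩ := h5 (c1, c2) hc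
            exact ⟨(h3 c1 c2).2 (Or.inr hc), by rw [hdm]; omega⟩
        have hihr := ih f (q2 ++ new) vis' dist' hfu hq1' hInv' hvs' hq2'
        show loopA p f q' vis' dist' = 0 ↔ ∃ n ∈ (n1, n2) :: rest, Trig p s n
        rw [h1, List.append_assoc, hihr]
        constructor
        · rintro ⟨m, hm, ht⟩; exact ⟨m, List.mem_cons_of_mem _ hm, ht⟩
        · rintro ⟨m, hm, ht⟩
          rcases List.mem_cons.1 hm with rfl | hm
          · exact absurd ht hnt
          · exact ⟨m, hm, ht⟩


lemma bfsOneA_eq (p : List (List String)) (sx sy : Int) :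
    (bfsOneA p sx sy = 0 ↔ VA p (sx, sy)) := by
  have hx0 : (fun a b => if a = sx ∧ b = sy then true else false) sx sy = true := by simp
  have hv0 : ∀ d ∈ dirsA,
      (fun a b => if a = sx ∧ b = sy then true else false) (sx + d.1) (sy + d.2) = false := by
    intro d hd
    rw [dirsA_eq] at hd
    fin_cases hd <;> exact if_neg (by rintro ⟨h1, h2⟩; omega)
  unfold bfsOneA VA
  rw [show (30 : Nat) = 29 + 1 from rfl]
  simp only [loopA]
  rcases hs : innerA p sx sy dirsA [] (fun a b => if a = sx ∧ b = sy then true else false)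
      (fun _ _ => 0) with _ | ⟨⟨q', vis', dist'⟩⟩
  · rw [innerA_none_iff p sx sy dirsA [] _ _ hx0] at hs
    obtain ⟨-, d, hd, hIR, -, hP⟩ := hs
    constructor
    · intro _
      exact Or.inl ⟨d, hd, hIR, hP⟩
    · intro _; rfl
  · have hnn := (innerA_none_iff p sx sy dirsA []
      (fun a b => if a = sx ∧ b = sy then true else false) (fun _ _ => 0) hx0).2
    have hnot : ¬((fun _ _ => (0 : Int)) sx sy < 2 ∧ ∃ d ∈ dirsA, IRc (sx + d.1, sy + d.2) ∧
        (fun a b => if a = sx ∧ b = sy then true else false) (sx + d.1) (sy + d.2) = false ∧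
        cell p (sx + d.1) (sy + d.2) = "P") := by
      intro hr
      rw [hnn hr] at hs
      simp at hs
    obtain ⟨new, h1, h2, h3, h4, h5, h6, h7⟩ :=
      innerA_some_spec p sx sy dirsA [] _ _ q' vis' dist' hx0 hs
    have hq'new : new = q' := by simpa using h1.symm
    subst hq'new
    have hlen : new.length < 29 := by
      rw [dirsA_eq] at h2
      simp only [List.length_cons, List.length_nil] at h2
      omega
    have hq1' : ∀ m ∈ new, vis' m.1 m.2 = true ∧ dist' m.1 m.2 = 1 := by
      intro m hm
      obtain ⟨m1, m2⟩ := m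
      obtain ⟨-, -, hdm⟩ := h5 (m1, m2) hm
      exact ⟨(h3 m1 m2).2 (Or.inr hm), by rw [hdm]; norm_num⟩
    have hInv' : ∀ a b, vis' a b = true → cell p a b = "P" → (a, b) = (sx, sy) := by
      intro a b hv' hPc
      rcases (h3 a b).1 hv' with hvv | hnn2
      · by_cases hab : a = sx ∧ b = sy
        · rw [hab.1, hab.2]
        · rw [if_neg hab] at hvv; exact Bool.noConfusion hvv
      · obtain ⟨-, hOc, -⟩ := h5 (a, b) hnn2
        exact absurd (hOc.symm.trans hPc) (by decide)
    have hvs' : vis' sx sy = true := (h3 sx sy).2 (Or.inl hx0)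
    have hph2 := loopA_phase2 p (sx, sy) new 29 [] vis' dist' hlen hq1' hInv' hvs'
      (by rintro c hc; exact absurd hc (List.not_mem_nil))
    rw [List.append_nil] at hph2
    show loopA p 29 new vis' dist' = 0 ↔ _
    rw [hph2]
    constructor
    · rintro ⟨m, hm, ht⟩
      obtain ⟨m1, m2⟩ := m
      obtain ⟨d, hd, he⟩ := h6 (m1, m2) hm
      rw [Prod.mk.injEq] at he
      obtain ⟨hIR, hOc, -⟩ := h5 (m1, m2) hm
      right
      refine ⟨d, hd, ?_, ?_, ?_⟩
      · rw [← he.1, ← he.2]; exact hIR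
      · rw [← he.1, ← he.2]; exact hOc
      · rw [← he.1, ← he.2]; exact ht
    · intro hVA
      rcases hVA with ⟨d, hd, hIR, hP⟩ | ⟨d, hd, hIR, hOc, ht⟩
      · exact absurd ⟨by norm_num, d, hd, hIR, hv0 d hd, hP⟩ hnot
      · exact ⟨(sx + d.1, sy + d.2), h7 d hd hIR hOc (hv0 d hd), ht⟩

lemma outerA_eq_zero_iff (p : List (List String)) :
    ∀ L : List (Int × Int), (outerA p L = 0 ↔ ∃ s ∈ L, bfsOneA p s.1 s.2 = 0) := by
  intro L
  induction L with
  | nil => simp [outerA]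
  | cons s rest ih =>
    simp only [outerA]
    by_cases h : bfsOneA p s.1 s.2 = 0
    · simp [h]
    · simp [h, ih]

lemma outerA_zero_or_one (p : List (List String)) :
    ∀ L : List (Int × Int), outerA p L = 0 ∨ outerA p L = 1 := by
  intro L
  induction L with
  | nil => simp [outerA]
  | cons s rest ih =>
    simp only [outerA]
    by_cases h : bfsOneA p s.1 s.2 = 0 <;> simp [h, ih]

lemma startA_eq (p : List (List String)) :
    startA p = r5.flatMap fun i =>
      (r5.filter fun j => decide (cell p i j = "P")).map fun j => (i, j) := by
  unfold startA
  have hcol : ∀ (i : Int) (acc : List (Int × Int)),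
      r5.foldl (fun acc2 j => if cell p i j = "P" then acc2 ++ [(i, j)] else acc2) acc
        = acc ++ ((r5.filter fun j => decide (cell p i j = "P")).map fun j => (i, j)) := by
    intro i acc
    first
      | exact PySem.List.foldl_append_ite (fun j => cell p i j = "P") (fun j => (i, j))
      | apply PySem.List.foldl_append_ite
  have hfun : (fun (acc : List (Int × Int)) (i : Int) =>
      r5.foldl (fun acc2 j => if cell p i j = "P" then acc2 ++ [(i, j)] else acc2) acc)
      = fun acc i => acc ++ ((r5.filter fun j => decide (cell p i j = "P")).map fun j => (i, j)) :=
    funext fun acc => funext fun i => hcol i acc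
  rw [hfun, PySem.List.foldl_append_eq_flatMap, List.nil_append]

lemma startA_mem (p : List (List String)) (m : Int × Int) :
    m ∈ startA p ↔ (m.1 ∈ r5 ∧ m.2 ∈ r5 ∧ cell p m.1 m.2 = "P") := by
  obtain ⟨m1, m2⟩ := m
  rw [startA_eq]
  simp only [List.mem_flatMap, List.mem_map, List.mem_filter, decide_eq_true_eq, Prod.mk.injEq]
  constructor
  · rintro ⟨i, hi, j, ⟨hj, hP⟩, rfl, rfl⟩
    exact ⟨hi, hj, hP⟩
  · rintro ⟨h1, h2, h3⟩
    exact ⟨m1, h1, m2, ⟨h2, h3⟩, rfl, rfl⟩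

def D1 (p : List (List String)) (i j : Int) : Prop :=
  ∃ d ∈ orthB, IRc (i + d.1, j + d.2) ∧ cell p (i + d.1) (j + d.2) = "P"
def D2 (p : List (List String)) (i j : Int) : Prop :=
  ∃ d ∈ orthB, IRc (i + 2 * d.1, j + 2 * d.2) ∧ cell p (i + 2 * d.1) (j + 2 * d.2) = "P" ∧
    cell p (i + d.1) (j + d.2) = "O"
def D3 (p : List (List String)) (i j : Int) : Prop :=
  ∃ d ∈ diagB, IRc (i + d.1, j + d.2) ∧ cell p (i + d.1) (j + d.2) = "P" ∧
    (cell p (i + d.1) j = "O" ∨ cell p i (j + d.2) = "O")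

lemma dangerB_iff (p : List (List String)) (i j : Int) :
    dangerB p i j = true ↔ (D1 p i j ∨ D2 p i j ∨ D3 p i j) := by
  unfold dangerB D1 D2 D3
  simp only [IRc, List.any_eq_true, Bool.or_eq_true, Bool.and_eq_true, decide_eq_true_eq,
    beq_iff_eq, and_assoc]
  exact or_assoc

lemma mem_orthB_of_dirsA {d : Int × Int} (h : d ∈ dirsA) : d ∈ orthB := by
  rw [dirsA_eq] at h; fin_cases h <;> decide

lemma mem_dirsA_of_orthB {d : Int × Int} (h : d ∈ orthB) : d ∈ dirsA := by
  rw [show orthB = [(0, 1), (0, -1), (1, 0), (-1, 0)] from rfl] at h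
  fin_cases h <;> decide

lemma cell_grid (p : List (List String)) (a b : Int)
    (ha0 : 0 ≤ a) (ha1 : a < 5) (hb0 : 0 ≤ b) (hb1 : b < 5) :
    cell (gridB p) a b = cell p a b := by
  have ha : a = 0 ∨ a = 1 ∨ a = 2 ∨ a = 3 ∨ a = 4 := by omega
  have hb : b = 0 ∨ b = 1 ∨ b = 2 ∨ b = 3 ∨ b = 4 := by omega
  rcases ha with rfl | rfl | rfl | rfl | rfl <;> rcases hb with rfl | rfl | rfl | rfl | rfl <;> rfl

lemma danger_grid (p : List (List String)) (i j : Int)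
    (hi : 0 ≤ i ∧ i < 5) (hj : 0 ≤ j ∧ j < 5) :
    (dangerB (gridB p) i j = true ↔ dangerB p i j = true) := by
  obtain ⟨hi0, hi1⟩ := hi
  obtain ⟨hj0, hj1⟩ := hj
  rw [dangerB_iff, dangerB_iff]
  apply or_congr
  · unfold D1
    constructor
    · rintro ⟨d, hd, hIR, hP⟩
      have hB := hIR; simp only [IRc] at hB
      rw [cell_grid p _ _ hB.1 hB.2.1 hB.2.2.1 hB.2.2.2] at hP
      exact ⟨d, hd, hIR, hP⟩
    · rintro ⟨d, hd, hIR, hP⟩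
      have hB := hIR; simp only [IRc] at hB
      refine ⟨d, hd, hIR, ?_⟩
      rw [cell_grid p _ _ hB.1 hB.2.1 hB.2.2.1 hB.2.2.2]
      exact hP
  apply or_congr
  · unfold D2
    constructor
    · rintro ⟨d, hd, hIR, hP, hO⟩
      have hB := hIR; simp only [IRc] at hB
      rw [cell_grid p _ _ hB.1 hB.2.1 hB.2.2.1 hB.2.2.2] at hP
      refine ⟨d, hd, hIR, hP, ?_⟩
      rw [show orthB = [(0, 1), (0, -1), (1, 0), (-1, 0)] from rfl] at hd
      fin_cases hd <;>
        · rw [cell_grid p _ _ (by omega) (by omega) (by omega) (by omega)] at hO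
          exact hO
    · rintro ⟨d, hd, hIR, hP, hO⟩
      have hB := hIR; simp only [IRc] at hB
      refine ⟨d, hd, hIR, ?_, ?_⟩
      · rw [cell_grid p _ _ hB.1 hB.2.1 hB.2.2.1 hB.2.2.2]
        exact hP
      · rw [show orthB = [(0, 1), (0, -1), (1, 0), (-1, 0)] from rfl] at hd
        fin_cases hd <;>
          · rw [cell_grid p _ _ (by omega) (by omega) (by omega) (by omega)]
            exact hO
  · unfold D3
    constructor
    · rintro ⟨d, hd, hIR, hP, hc⟩
      have hB := hIR; simp only [IRc] at hB
      rw [cell_grid p _ _ hB.1 hB.2.1 hB.2.2.1 hB.2.2.2] at hP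
      refine ⟨d, hd, hIR, hP, ?_⟩
      rcases hc with hc | hc
      · rw [cell_grid p _ _ hB.1 hB.2.1 hj0 hj1] at hc
        exact Or.inl hc
      · rw [cell_grid p _ _ hi0 hi1 hB.2.2.1 hB.2.2.2] at hc
        exact Or.inr hc
    · rintro ⟨d, hd, hIR, hP, hc⟩
      have hB := hIR; simp only [IRc] at hB
      refine ⟨d, hd, hIR, ?_, ?_⟩
      · rw [cell_grid p _ _ hB.1 hB.2.1 hB.2.2.1 hB.2.2.2]
        exact hP
      · rcases hc with hc | hc
        · refine Or.inl ?_
          rw [cell_grid p _ _ hB.1 hB.2.1 hj0 hj1]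
          exact hc
        · refine Or.inr ?_
          rw [cell_grid p _ _ hi0 hi1 hB.2.2.1 hB.2.2.2]
          exact hc

-- the core per-cell equivalence: BFS violation = fixed-offset violation
lemma VA_iff_dangerB (p : List (List String)) (i j : Int)
    (hi : 0 ≤ i ∧ i < 5) (hj : 0 ≤ j ∧ j < 5) :
    VA p (i, j) ↔ dangerB p i j = true := by
  rw [dangerB_iff]
  unfold VA Trig D1 D2 D3
  obtain ⟨hi0, hi1⟩ := hi
  obtain ⟨hj0, hj1⟩ := hj
  constructor
  · rintro (⟨d, hd, hIR, hP⟩ | ⟨d, hd, hIR, hOc, e, he, hIR2, hP2, hne⟩)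
    · exact Or.inl ⟨d, mem_orthB_of_dirsA hd, hIR, hP⟩
    · rw [dirsA_eq] at hd he
      simp only [List.mem_cons, List.not_mem_nil, or_false] at hd he
      rcases hd with rfl | rfl | rfl | rfl <;> rcases he with rfl | rfl | rfl | rfl
      · refine Or.inr (Or.inl ⟨(0, -1), by decide, ?_, ?_, ?_⟩)
        · simp only [IRc] at hIR2 ⊢; omega
        · show cell p (i + 2 * 0) (j + 2 * -1) = "P"
          rw [show i + 2 * (0 : Int) = i + 0 + 0 from by ring, show j + 2 * (-1 : Int) = j + -1 + -1 from by ring]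
          exact hP2
        · exact hOc
      · exact absurd ((by rw [show i + 0 + 0 = i from by ring, show j + -1 + 1 = j from by ring]) : (i + 0 + 0, j + -1 + 1) = (i, j)) hne
      · refine Or.inr (Or.inr ⟨(1, -1), by decide, ?_, ?_, ?_⟩)
        · simp only [IRc] at hIR2 ⊢; omega
        · show cell p (i + 1) (j + -1) = "P"
          rw [show i + (1 : Int) = i + 0 + 1 from by ring, show j + (-1 : Int) = j + -1 + 0 from by ring]
          exact hP2
        · refine Or.inr ?_
          show cell p i (j + -1) = "O"
          rw [show j + (-1 : Int) = j + -1 from by ring, show (i : Int) = i + 0 from by ring]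
          exact hOc
      · refine Or.inr (Or.inr ⟨(-1, -1), by decide, ?_, ?_, ?_⟩)
        · simp only [IRc] at hIR2 ⊢; omega
        · show cell p (i + -1) (j + -1) = "P"
          rw [show i + (-1 : Int) = i + 0 + -1 from by ring, show j + (-1 : Int) = j + -1 + 0 from by ring]
          exact hP2
        · refine Or.inr ?_
          show cell p i (j + -1) = "O"
          rw [show j + (-1 : Int) = j + -1 from by ring, show (i : Int) = i + 0 from by ring]
          exact hOc
      · exact absurd ((by rw [show i + 0 + 0 = i from by ring, show j + 1 + -1 = j from by ring]) : (i + 0 + 0, j + 1 + -1) = (i, j)) hne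
      · refine Or.inr (Or.inl ⟨(0, 1), by decide, ?_, ?_, ?_⟩)
        · simp only [IRc] at hIR2 ⊢; omega
        · show cell p (i + 2 * 0) (j + 2 * 1) = "P"
          rw [show i + 2 * (0 : Int) = i + 0 + 0 from by ring, show j + 2 * (1 : Int) = j + 1 + 1 from by ring]
          exact hP2
        · exact hOc
      · refine Or.inr (Or.inr ⟨(1, 1), by decide, ?_, ?_, ?_⟩)
        · simp only [IRc] at hIR2 ⊢; omega
        · show cell p (i + 1) (j + 1) = "P"
          rw [show i + (1 : Int) = i + 0 + 1 from by ring, show j + (1 : Int) = j + 1 + 0 from by ring]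
          exact hP2
        · refine Or.inr ?_
          show cell p i (j + 1) = "O"
          rw [show j + (1 : Int) = j + 1 from by ring, show (i : Int) = i + 0 from by ring]
          exact hOc
      · refine Or.inr (Or.inr ⟨(-1, 1), by decide, ?_, ?_, ?_⟩)
        · simp only [IRc] at hIR2 ⊢; omega
        · show cell p (i + -1) (j + 1) = "P"
          rw [show i + (-1 : Int) = i + 0 + -1 from by ring, show j + (1 : Int) = j + 1 + 0 from by ring]
          exact hP2
        · refine Or.inr ?_
          show cell p i (j + 1) = "O"
          rw [show j + (1 : Int) = j + 1 from by ring, show (i : Int) = i + 0 from by ring]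
          exact hOc
      · refine Or.inr (Or.inr ⟨(1, -1), by decide, ?_, ?_, ?_⟩)
        · simp only [IRc] at hIR2 ⊢; omega
        · show cell p (i + 1) (j + -1) = "P"
          rw [show i + (1 : Int) = i + 1 + 0 from by ring, show j + (-1 : Int) = j + 0 + -1 from by ring]
          exact hP2
        · refine Or.inl ?_
          show cell p (i + 1) j = "O"
          rw [show i + (1 : Int) = i + 1 from by ring, show (j : Int) = j + 0 from by ring]
          exact hOc
      · refine Or.inr (Or.inr ⟨(1, 1), by decide, ?_, ?_, ?_⟩)
        · simp only [IRc] at hIR2 ⊢; omega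
        · show cell p (i + 1) (j + 1) = "P"
          rw [show i + (1 : Int) = i + 1 + 0 from by ring, show j + (1 : Int) = j + 0 + 1 from by ring]
          exact hP2
        · refine Or.inl ?_
          show cell p (i + 1) j = "O"
          rw [show i + (1 : Int) = i + 1 from by ring, show (j : Int) = j + 0 from by ring]
          exact hOc
      · refine Or.inr (Or.inl ⟨(1, 0), by decide, ?_, ?_, ?_⟩)
        · simp only [IRc] at hIR2 ⊢; omega
        · show cell p (i + 2 * 1) (j + 2 * 0) = "P"
          rw [show i + 2 * (1 : Int) = i + 1 + 1 from by ring, show j + 2 * (0 : Int) = j + 0 + 0 from by ring]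
          exact hP2
        · exact hOc
      · exact absurd ((by rw [show i + 1 + -1 = i from by ring, show j + 0 + 0 = j from by ring]) : (i + 1 + -1, j + 0 + 0) = (i, j)) hne
      · refine Or.inr (Or.inr ⟨(-1, -1), by decide, ?_, ?_, ?_⟩)
        · simp only [IRc] at hIR2 ⊢; omega
        · show cell p (i + -1) (j + -1) = "P"
          rw [show i + (-1 : Int) = i + -1 + 0 from by ring, show j + (-1 : Int) = j + 0 + -1 from by ring]
          exact hP2
        · refine Or.inl ?_
          show cell p (i + -1) j = "O"
          rw [show i + (-1 : Int) = i + -1 from by ring, show (j : Int) = j + 0 from by ring]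
          exact hOc
      · refine Or.inr (Or.inr ⟨(-1, 1), by decide, ?_, ?_, ?_⟩)
        · simp only [IRc] at hIR2 ⊢; omega
        · show cell p (i + -1) (j + 1) = "P"
          rw [show i + (-1 : Int) = i + -1 + 0 from by ring, show j + (1 : Int) = j + 0 + 1 from by ring]
          exact hP2
        · refine Or.inl ?_
          show cell p (i + -1) j = "O"
          rw [show i + (-1 : Int) = i + -1 from by ring, show (j : Int) = j + 0 from by ring]
          exact hOc
      · exact absurd ((by rw [show i + -1 + 1 = i from by ring, show j + 0 + 0 = j from by ring]) : (i + -1 + 1, j + 0 + 0) = (i, j)) hne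
      · refine Or.inr (Or.inl ⟨(-1, 0), by decide, ?_, ?_, ?_⟩)
        · simp only [IRc] at hIR2 ⊢; omega
        · show cell p (i + 2 * -1) (j + 2 * 0) = "P"
          rw [show i + 2 * (-1 : Int) = i + -1 + -1 from by ring, show j + 2 * (0 : Int) = j + 0 + 0 from by ring]
          exact hP2
        · exact hOc
  · rintro (⟨d, hd, hIR, hP⟩ | ⟨d, hd, hIR, hP2, hOc⟩ | ⟨d, hd, hIR, hP2, hc⟩)
    · exact Or.inl ⟨d, mem_dirsA_of_orthB hd, hIR, hP⟩
    · rw [show orthB = [(0, 1), (0, -1), (1, 0), (-1, 0)] from rfl] at hd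
      simp only [List.mem_cons, List.not_mem_nil, or_false] at hd
      rcases hd with rfl | rfl | rfl | rfl
      · refine Or.inr ⟨(0, 1), by decide, ?_, ?_, ⟨(0, 1), by decide, ?_, ?_, ?_⟩⟩
        · simp only [IRc] at hIR ⊢; omega
        · exact hOc
        · simp only [IRc] at hIR ⊢; omega
        · show cell p (i + 0 + 0) (j + 1 + 1) = "P"
          rw [show i + (0 : Int) + 0 = i + 2 * 0 from by ring, show j + (1 : Int) + 1 = j + 2 * 1 from by ring]
          exact hP2
        · intro he; simp only [Prod.mk.injEq] at he; omega
      · refine Or.inr ⟨(0, -1), by decide, ?_, ?_, ⟨(0, -1), by decide, ?_, ?_, ?_⟩⟩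
        · simp only [IRc] at hIR ⊢; omega
        · exact hOc
        · simp only [IRc] at hIR ⊢; omega
        · show cell p (i + 0 + 0) (j + -1 + -1) = "P"
          rw [show i + (0 : Int) + 0 = i + 2 * 0 from by ring, show j + (-1 : Int) + -1 = j + 2 * -1 from by ring]
          exact hP2
        · intro he; simp only [Prod.mk.injEq] at he; omega
      · refine Or.inr ⟨(1, 0), by decide, ?_, ?_, ⟨(1, 0), by decide, ?_, ?_, ?_⟩⟩
        · simp only [IRc] at hIR ⊢; omega
        · exact hOc
        · simp only [IRc] at hIR ⊢; omega
        · show cell p (i + 1 + 1) (j + 0 + 0) = "P"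
          rw [show i + (1 : Int) + 1 = i + 2 * 1 from by ring, show j + (0 : Int) + 0 = j + 2 * 0 from by ring]
          exact hP2
        · intro he; simp only [Prod.mk.injEq] at he; omega
      · refine Or.inr ⟨(-1, 0), by decide, ?_, ?_, ⟨(-1, 0), by decide, ?_, ?_, ?_⟩⟩
        · simp only [IRc] at hIR ⊢; omega
        · exact hOc
        · simp only [IRc] at hIR ⊢; omega
        · show cell p (i + -1 + -1) (j + 0 + 0) = "P"
          rw [show i + (-1 : Int) + -1 = i + 2 * -1 from by ring, show j + (0 : Int) + 0 = j + 2 * 0 from by ring]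
          exact hP2
        · intro he; simp only [Prod.mk.injEq] at he; omega
    · rw [show diagB = [(1, 1), (1, -1), (-1, 1), (-1, -1)] from rfl] at hd
      simp only [List.mem_cons, List.not_mem_nil, or_false] at hd
      rcases hd with rfl | rfl | rfl | rfl <;> rcases hc with hOc | hOc
      · refine Or.inr ⟨(1, 0), by decide, ?_, ?_, ⟨(0, 1), by decide, ?_, ?_, ?_⟩⟩
        · simp only [IRc] at hIR ⊢; omega
        · show cell p (i + 1) (j + 0) = "O"
          rw [show j + (0 : Int) = j from by ring]
          exact hOc
        · simp only [IRc] at hIR ⊢; omega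
        · show cell p (i + 1 + 0) (j + 0 + 1) = "P"
          rw [show i + (1 : Int) + 0 = i + 1 from by ring, show j + (0 : Int) + 1 = j + 1 from by ring]
          exact hP2
        · intro he; simp only [Prod.mk.injEq] at he; omega
      · refine Or.inr ⟨(0, 1), by decide, ?_, ?_, ⟨(1, 0), by decide, ?_, ?_, ?_⟩⟩
        · simp only [IRc] at hIR ⊢; omega
        · show cell p (i + 0) (j + 1) = "O"
          rw [show i + (0 : Int) = i from by ring]
          exact hOc
        · simp only [IRc] at hIR ⊢; omega
        · show cell p (i + 0 + 1) (j + 1 + 0) = "P"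
          rw [show i + (0 : Int) + 1 = i + 1 from by ring, show j + (1 : Int) + 0 = j + 1 from by ring]
          exact hP2
        · intro he; simp only [Prod.mk.injEq] at he; omega
      · refine Or.inr ⟨(1, 0), by decide, ?_, ?_, ⟨(0, -1), by decide, ?_, ?_, ?_⟩⟩
        · simp only [IRc] at hIR ⊢; omega
        · show cell p (i + 1) (j + 0) = "O"
          rw [show j + (0 : Int) = j from by ring]
          exact hOc
        · simp only [IRc] at hIR ⊢; omega
        · show cell p (i + 1 + 0) (j + 0 + -1) = "P"
          rw [show i + (1 : Int) + 0 = i + 1 from by ring, show j + (0 : Int) + -1 = j + -1 from by ring]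
          exact hP2
        · intro he; simp only [Prod.mk.injEq] at he; omega
      · refine Or.inr ⟨(0, -1), by decide, ?_, ?_, ⟨(1, 0), by decide, ?_, ?_, ?_⟩⟩
        · simp only [IRc] at hIR ⊢; omega
        · show cell p (i + 0) (j + -1) = "O"
          rw [show i + (0 : Int) = i from by ring]
          exact hOc
        · simp only [IRc] at hIR ⊢; omega
        · show cell p (i + 0 + 1) (j + -1 + 0) = "P"
          rw [show i + (0 : Int) + 1 = i + 1 from by ring, show j + (-1 : Int) + 0 = j + -1 from by ring]
          exact hP2
        · intro he; simp only [Prod.mk.injEq] at he; omega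
      · refine Or.inr ⟨(-1, 0), by decide, ?_, ?_, ⟨(0, 1), by decide, ?_, ?_, ?_⟩⟩
        · simp only [IRc] at hIR ⊢; omega
        · show cell p (i + -1) (j + 0) = "O"
          rw [show j + (0 : Int) = j from by ring]
          exact hOc
        · simp only [IRc] at hIR ⊢; omega
        · show cell p (i + -1 + 0) (j + 0 + 1) = "P"
          rw [show i + (-1 : Int) + 0 = i + -1 from by ring, show j + (0 : Int) + 1 = j + 1 from by ring]
          exact hP2
        · intro he; simp only [Prod.mk.injEq] at he; omega
      · refine Or.inr ⟨(0, 1), by decide, ?_, ?_, ⟨(-1, 0), by decide, ?_, ?_, ?_⟩⟩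
        · simp only [IRc] at hIR ⊢; omega
        · show cell p (i + 0) (j + 1) = "O"
          rw [show i + (0 : Int) = i from by ring]
          exact hOc
        · simp only [IRc] at hIR ⊢; omega
        · show cell p (i + 0 + -1) (j + 1 + 0) = "P"
          rw [show i + (0 : Int) + -1 = i + -1 from by ring, show j + (1 : Int) + 0 = j + 1 from by ring]
          exact hP2
        · intro he; simp only [Prod.mk.injEq] at he; omega
      · refine Or.inr ⟨(-1, 0), by decide, ?_, ?_, ⟨(0, -1), by decide, ?_, ?_, ?_⟩⟩
        · simp only [IRc] at hIR ⊢; omega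
        · show cell p (i + -1) (j + 0) = "O"
          rw [show j + (0 : Int) = j from by ring]
          exact hOc
        · simp only [IRc] at hIR ⊢; omega
        · show cell p (i + -1 + 0) (j + 0 + -1) = "P"
          rw [show i + (-1 : Int) + 0 = i + -1 from by ring, show j + (0 : Int) + -1 = j + -1 from by ring]
          exact hP2
        · intro he; simp only [Prod.mk.injEq] at he; omega
      · refine Or.inr ⟨(0, -1), by decide, ?_, ?_, ⟨(-1, 0), by decide, ?_, ?_, ?_⟩⟩
        · simp only [IRc] at hIR ⊢; omega
        · show cell p (i + 0) (j + -1) = "O"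
          rw [show i + (0 : Int) = i from by ring]
          exact hOc
        · simp only [IRc] at hIR ⊢; omega
        · show cell p (i + 0 + -1) (j + -1 + 0) = "P"
          rw [show i + (0 : Int) + -1 = i + -1 from by ring, show j + (-1 : Int) + 0 = j + -1 from by ring]
          exact hP2
        · intro he; simp only [Prod.mk.injEq] at he; omega

-- ===== VERDICT (by name: the statement is the Claim_ definition above) =====
theorem bfs_spec : Claim_equal_bfs := by
  intro x y p _ _
  unfold Spec_bfs
  have hA : bfs x y p = 0 ↔ ∃ i ∈ r5, ∃ j ∈ r5, cell p i j = "P" ∧ dangerB p i j = true := by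
    unfold bfs
    rw [outerA_eq_zero_iff]
    constructor
    · rintro ⟨s, hs, h0⟩
      rw [startA_mem] at hs
      have hi : 0 ≤ s.1 ∧ s.1 < 5 := mem_r5_bounds hs.1
      have hj : 0 ≤ s.2 ∧ s.2 < 5 := mem_r5_bounds hs.2.1
      exact ⟨s.1, hs.1, s.2, hs.2.1, hs.2.2,
        (VA_iff_dangerB p s.1 s.2 hi hj).1 ((bfsOneA_eq p s.1 s.2).1 h0)⟩
    · rintro ⟨i, hi, j, hj, hP, hd⟩
      have hi' : 0 ≤ i ∧ i < 5 := mem_r5_bounds hi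
      have hj' : 0 ≤ j ∧ j < 5 := mem_r5_bounds hj
      exact ⟨(i, j), (startA_mem p (i, j)).2 ⟨hi, hj, hP⟩,
        (bfsOneA_eq p i j).2 ((VA_iff_dangerB p i j hi' hj').2 hd)⟩
  have heq : bfs_alt x y p =
      (if r5.any (fun i => r5.any fun j => (cell (gridB p) i j == "P") && dangerB (gridB p) i j)
        then (0 : Int) else 1) := rfl
  have hcond : (r5.any fun i =>
        r5.any fun j => (cell (gridB p) i j == "P") && dangerB (gridB p) i j) = true ↔
      ∃ i ∈ r5, ∃ j ∈ r5, cell p i j = "P" ∧ dangerB p i j = true := by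
    simp only [List.any_eq_true, Bool.and_eq_true, beq_iff_eq]
    constructor
    · rintro ⟨i, hi, j, hj, hP, hd⟩
      obtain ⟨hi0, hi1⟩ := mem_r5_bounds hi
      obtain ⟨hj0, hj1⟩ := mem_r5_bounds hj
      rw [cell_grid p i j hi0 hi1 hj0 hj1] at hP
      rw [danger_grid p i j ⟨hi0, hi1⟩ ⟨hj0, hj1⟩] at hd
      exact ⟨i, hi, j, hj, hP, hd⟩
    · rintro ⟨i, hi, j, hj, hP, hd⟩
      obtain ⟨hi0, hi1⟩ := mem_r5_bounds hi
      obtain ⟨hj0, hj1⟩ := mem_r5_bounds hj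
      refine ⟨i, hi, j, hj, ?_, ?_⟩
      · rw [cell_grid p i j hi0 hi1 hj0 hj1]; exact hP
      · rw [danger_grid p i j ⟨hi0, hi1⟩ ⟨hj0, hj1⟩]; exact hd
  have hB : bfs_alt x y p = 0 ↔ ∃ i ∈ r5, ∃ j ∈ r5, cell p i j = "P" ∧ dangerB p i j = true := by
    rw [heq]
    split
    · next h => exact ⟨fun _ => hcond.1 h, fun _ => rfl⟩
    · next h =>
      refine ⟨fun hc => absurd hc (by norm_num), fun hc => absurd (hcond.2 hc) h⟩
  have hAB : bfs x y p = 0 ↔ bfs_alt x y p = 0 := hA.trans hB.symm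
  have h1 : bfs x y p = 0 ∨ bfs x y p = 1 := outerA_zero_or_one p (startA p)
  have h2 : bfs_alt x y p = 0 ∨ bfs_alt x y p = 1 := by
    rw [heq]; split
    · left; rfl
    · right; rfl
  rcases h1 with h | h <;> rcases h2 with h' | h' <;> omega
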